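-- pv_equiv track=rewrite | github.com/almostazn/coding_puzzles | 2023/day14.py | get_load
-- ===== SOURCE A (Python) =====
-- def get_load(grid):
--     total = 0
--     num_rows = len(grid)
--     for i in range(num_rows):
--         count = 0
--         for c in grid[i]:
--             if c == 'O':
--                 count += 1
--         total += (num_rows - i) * count
--     return total
-- ===== SOURCE B (Python) =====
-- def get_load(grid):
--     running = 0
--     total = 0
--     for row in grid:
--         running += sum(1 if c == 'O' else 0 for c in row)
--         total += running
--     return total
-- ===== Notes on version B (the rewrite author's own statement) =====
-- stated objective: alternative
-- what changed: Replaces the index-based weighted sum (num_rows - i) * count with a single index-free pass that keeps a running prefix count of 'O's and adds it to the total at every row, using the identity sum_i (n-i)*c_i = sum_j (c_0+...+c_j).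
import Mathlib
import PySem

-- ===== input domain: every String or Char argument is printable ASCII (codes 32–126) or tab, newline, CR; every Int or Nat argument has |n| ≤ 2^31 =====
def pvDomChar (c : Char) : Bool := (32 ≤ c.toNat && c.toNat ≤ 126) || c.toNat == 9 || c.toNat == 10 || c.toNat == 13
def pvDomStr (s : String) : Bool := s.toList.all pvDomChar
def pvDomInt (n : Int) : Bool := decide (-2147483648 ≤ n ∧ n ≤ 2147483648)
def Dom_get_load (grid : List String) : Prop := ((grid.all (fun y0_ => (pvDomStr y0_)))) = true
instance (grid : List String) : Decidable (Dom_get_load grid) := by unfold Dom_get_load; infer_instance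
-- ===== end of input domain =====

-- B replaces the index-based weight (num_rows - i) with a single pass keeping a running
-- prefix count of 'O's added into the total at every row (alternative decomposition, same cost).


-- ===== PORT A =====
-- grid[i] with i ∈ range(len(grid)) is always in range, so pyGetD with default "" is exact here
def get_load (grid : List String) : Int :=
  let num_rows : Int := grid.length
  (PySem.List.pyRange 0 num_rows 1).foldl
    (fun total i =>
      let count : Int :=
        (PySem.List.pyGetD grid i "").toList.foldl
          (fun count c => if c == 'O' then count + 1 else count) 0
      total + (num_rows - i) * count) 0

-- ===== PORT B =====
def get_load_alt (grid : List String) : Int :=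
  (grid.foldl
    (fun (rt : Int × Int) row =>
      let running := rt.1 + (row.toList.map (fun c => if c == 'O' then (1 : Int) else 0)).sum
      (running, rt.2 + running))
    (0, 0)).2

-- ===== PRECONDITION & SPEC =====
def Spec_get_load (grid : List String) (out : Int) : Prop := out = get_load_alt grid
instance (grid : List String) (out : Int) : Decidable (Spec_get_load grid out) := by unfold Spec_get_load; infer_instance

-- ===== CLAIM (what is proved, stated in full; the proofs are below) =====
def Claim_equal_get_load : Prop := ∀ (grid : List String), Dom_get_load grid → Spec_get_load grid (get_load grid)

-- ===== LEMMAS AND PROOFS =====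

-- the common row count: number of 'O' characters, as an Int
def pvCnt (s : String) : Int := (s.toList.count 'O' : Int)

-- the common closed form both ports are reduced to
def pvSpecSum (grid : List String) : Int :=
  ((List.range grid.length).map
    (fun k => ((grid.length : Int) - k) * pvCnt (grid.getD k ""))).sum

theorem pvA_closed (grid : List String) : get_load grid = pvSpecSum grid := by
  simp only [get_load, pvSpecSum, pvCnt]
  rw [PySem.List.pyRange_zero_natCast, List.foldl_map]
  simp only [PySem.List.pyGetD_natCast, PySem.List.foldl_beq_add_one, zero_add]
  rw [PySem.List.foldl_add]
  simp

def pvF : Int × Int → String → Int × Int := fun rt row =>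
  let running := rt.1 + (row.toList.map (fun c => if c == 'O' then (1 : Int) else 0)).sum
  (running, rt.2 + running)

theorem pvF_gen (gs : List String) : ∀ r t : Int,
    (gs.foldl pvF (r, t)).2 = t + gs.length * r + (gs.foldl pvF (0, 0)).2 := by
  induction gs with
  | nil => intro r t; simp
  | cons s gs ih =>
    intro r t
    have hc : ∀ a b : Int, List.foldl pvF (a, b) (s :: gs)
        = List.foldl pvF (a + (s.toList.map (fun c => if c == 'O' then (1 : Int) else 0)).sum,
            b + (a + (s.toList.map (fun c => if c == 'O' then (1 : Int) else 0)).sum)) gs := by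
      intro a b; simp [pvF]
    set c := (s.toList.map (fun c => if c == 'O' then (1 : Int) else 0)).sum with hcdef
    rw [hc, hc, ih, ih (0 + c)]
    simp only [List.length_cons]
    push_cast
    ring

theorem pvRowSum (s : String) :
    (s.toList.map (fun c => if c == 'O' then (1 : Int) else 0)).sum = pvCnt s := by
  rw [PySem.List.sum_map_ite_one_zero, pvCnt, List.count]

theorem pvB_closed (grid : List String) : get_load_alt grid = pvSpecSum grid := by
  show (grid.foldl pvF (0, 0)).2 = pvSpecSum grid
  induction grid with
  | nil => simp [pvSpecSum]
  | cons s gs ih =>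
    have h0 : pvF (0, 0) s = (pvCnt s, pvCnt s) := by
      simp only [pvF, pvRowSum]; norm_num
    rw [List.foldl_cons, h0, pvF_gen gs (pvCnt s) (pvCnt s), ih]
    have hmap : List.map
          (fun k => (((s :: gs).length : Int) - k) * pvCnt ((s :: gs).getD k ""))
          (List.range (s :: gs).length)
        = ((gs.length : Int) + 1) * pvCnt s ::
          List.map (fun k => ((gs.length : Int) - k) * pvCnt (gs.getD k ""))
            (List.range gs.length) := by
      rw [List.length_cons, List.range_succ_eq_map, List.map_cons, List.map_map]
      refine congrArg₂ List.cons ?_ ?_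
      · push_cast; simp
      · apply List.map_congr_left
        intro k hk
        simp only [Function.comp_apply, List.getD_cons_succ]
        push_cast
        ring
    simp only [pvSpecSum, hmap, List.sum_cons]
    ring

-- ===== VERDICT (by name: the statement is the Claim_ definition above) =====
theorem get_load_spec : Claim_equal_get_load := by
  intro grid _
  unfold Spec_get_load
  rw [pvA_closed, pvB_closed]
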